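-- pv_equiv track=rewrite | github.com/zackees/fastled-wasm | src/fastled/string_diff.py | is_in_order_match
-- ===== SOURCE A (Python) =====
-- def is_in_order_match(input_str: str, other: str) -> bool:
--     """
--     Check if the input string is an in-order match for any string in the list.
--     An in-order match means that the characters of the input string appear
--     in the same order in the string from the list, ignoring spaces in the input.
--     """
--
--     # Remove spaces from input string for matching
--     input_chars = [c.lower() for c in input_str if c != " "]
--     other_chars = [c.lower() for c in other]
--     input_index = 0
--     other_index = 0
--     while input_index < len(input_chars) and other_index < len(other_chars):
--         if input_chars[input_index] == other_chars[other_index]: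
--             input_index += 1
--         other_index += 1
--     # If we reached the end of the input string, it means all characters were found in order
--     if input_index == len(input_chars):
--         return True
--     return False
-- ===== SOURCE B (Python) =====
-- def is_in_order_match(input_str: str, other: str) -> bool:
--     # Different algorithm: build an inverted index char -> sorted positions in
--     # `other` (one pass), then match each input char by binary-searching the
--     # first position of that char at or after the current cursor.
--     positions = {}
--     for i, c in enumerate(other):
--         positions.setdefault(c.lower(), []).append(i)
--     cur = 0
--     for c in input_str:
--         if c == " ":
--             continue
--         idxs = positions.get(c.lower(), [])
--         lo, hi = 0, len(idxs)
--         while lo < hi: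
--             mid = (lo + hi) // 2
--             if idxs[mid] < cur:
--                 lo = mid + 1
--             else:
--                 hi = mid
--         if lo == len(idxs):
--             return False
--         cur = idxs[lo] + 1
--     return True
-- ===== Notes on version B (the rewrite author's own statement) =====
-- stated objective: alternative
-- what changed: Replaces A's two-pointer scan of `other` with an inverted index built once (lowercased char -> list of positions) plus a hand-written binary search that jumps each input character to its first occurrence at or after the cursor; `other` is never rescanned character by character.
import Mathlib
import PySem

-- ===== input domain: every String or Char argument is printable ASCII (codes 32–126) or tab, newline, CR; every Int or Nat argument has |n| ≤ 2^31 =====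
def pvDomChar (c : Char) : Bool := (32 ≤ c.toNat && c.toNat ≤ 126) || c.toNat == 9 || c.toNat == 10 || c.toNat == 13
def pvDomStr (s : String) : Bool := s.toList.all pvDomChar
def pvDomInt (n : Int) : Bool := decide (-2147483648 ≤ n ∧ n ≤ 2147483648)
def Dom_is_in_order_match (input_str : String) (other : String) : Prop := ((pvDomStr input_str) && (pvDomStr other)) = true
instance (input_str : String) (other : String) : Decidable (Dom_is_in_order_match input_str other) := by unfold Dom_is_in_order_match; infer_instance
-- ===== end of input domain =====

-- B replaces A's two-pointer scan with an inverted index (char -> positions) plus binary search; alternative algorithm, same results.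


-- ===== PORT A =====
-- A: two-index while loop over input_chars/other_chars; transliterated as
-- structural recursion over the remaining `other` characters, carrying the
-- remaining input characters.
def pvALoop (inp : List Char) (oth : List Char) : List Char :=
  match inp, oth with
  | inp, [] => inp
  | [], _ => []
  | i :: is, o :: os => if i == o then pvALoop is os else pvALoop (i :: is) os

def is_in_order_match (input_str : String) (other : String) : Bool :=
  let input_chars := (input_str.toList.filter (fun c => c ≠ ' ')).map PySem.Chars.lowerChar
  let other_chars := other.toList.map PySem.Chars.lowerChar
  pvALoop input_chars other_chars |>.isEmpty

-- ===== PORT B =====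
-- for i, c in enumerate(other): positions.setdefault(c.lower(), []).append(i)
def pvIndex (oth : List Char) : PySem.Dict Char (List Int) :=
  (PySem.List.enumerate oth).foldl
    (fun d p => d.modify (PySem.Chars.lowerChar p.2) [] (fun v => v ++ [p.1]))
    PySem.Dict.empty

-- the hand-written `while lo < hi` binary search of Source B
def pvBisect (idxs : List Int) (cur : Int) (lo hi : Nat) : Nat :=
  if _h : lo < hi then
    let mid := (lo + hi) / 2
    if idxs.getD mid 0 < cur then pvBisect idxs cur (mid + 1) hi
    else pvBisect idxs cur lo mid
  else lo
termination_by hi - lo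
decreasing_by all_goals omega

-- the `for c in input_str` loop of Source B, threading the cursor `cur`
def pvBLoop (d : PySem.Dict Char (List Int)) (cur : Int) (inp : List Char) : Bool :=
  match inp with
  | [] => true
  | c :: cs =>
    if c = ' ' then pvBLoop d cur cs
    else
      let idxs := d.getD (PySem.Chars.lowerChar c) []
      let lo := pvBisect idxs cur 0 idxs.length
      if lo = idxs.length then false
      else pvBLoop d (idxs.getD lo 0 + 1) cs

def is_in_order_match_alt (input_str : String) (other : String) : Bool :=
  pvBLoop (pvIndex other.toList) 0 input_str.toList

-- ===== PRECONDITION & SPEC =====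
def Spec_is_in_order_match (input_str : String) (other : String) (out : Bool) : Prop := out = is_in_order_match_alt input_str other
instance (input_str : String) (other : String) (out : Bool) : Decidable (Spec_is_in_order_match input_str other out) := by unfold Spec_is_in_order_match; infer_instance

-- ===== CLAIM (what is proved, stated in full; the proofs are below) =====
def Claim_equal_is_in_order_match : Prop := ∀ (input_str : String) (other : String), Dom_is_in_order_match input_str other → Spec_is_in_order_match input_str other (is_in_order_match input_str other)

-- ===== LEMMAS AND PROOFS =====

-- occurrence positions of (lowercased) c in s, absolute offsets starting at j
def pvOcc (c : Char) (j : Nat) : List Char → List Int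
  | [] => []
  | x :: xs => if PySem.Chars.lowerChar x = c then (j : Int) :: pvOcc c (j + 1) xs
               else pvOcc c (j + 1) xs

-- the suffix of s after the first (lowercased) occurrence of c, if any
def pvAfter (c : Char) : List Char → Option (List Char)
  | [] => none
  | x :: xs => if PySem.Chars.lowerChar x = c then some xs else pvAfter c xs

theorem enum_filt (c : Char) : ∀ (s : List Char) (j : Nat),
    ((PySem.List.enumerate s (j : Int)).filter (fun p => PySem.Chars.lowerChar p.2 == c)).map (·.1)
      = pvOcc c j s := by
  intro s
  induction s with
  | nil => intro j; simp [PySem.List.enumerate_nil, pvOcc]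
  | cons x xs ih =>
    intro j
    rw [PySem.List.enumerate_cons]
    by_cases h : PySem.Chars.lowerChar x = c <;>
    · simp only [pvOcc, h, if_true, if_false, List.filter_cons, beq_iff_eq]
      have := ih (j + 1)
      push_cast at this
      simp [this]

theorem pvIndex_getD (oth : List Char) (c : Char) :
    (pvIndex oth).getD c [] = pvOcc c 0 oth := by
  unfold pvIndex
  have : (PySem.List.enumerate oth).foldl
      (fun d p => d.modify (PySem.Chars.lowerChar p.2) [] (fun v => v ++ [p.1]))
      PySem.Dict.empty
    = ((PySem.List.enumerate oth).map (fun p => (PySem.Chars.lowerChar p.2, p.1))).foldl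
      (fun d p => d.modify p.1 [] (fun v => v ++ [p.2])) PySem.Dict.empty := by
    rw [List.foldl_map]
  rw [this, PySem.Dict.getD_foldl_modify_append, List.filter_map, List.map_map]
  have h2 := enum_filt c oth 0
  push_cast at h2
  simpa [Function.comp, PySem.Dict.getD_empty] using h2

theorem pvOcc_append (c : Char) (s t : List Char) : ∀ j,
    pvOcc c j (s ++ t) = pvOcc c j s ++ pvOcc c (j + s.length) t := by
  induction s with
  | nil => intro j; simp [pvOcc]
  | cons x xs ih =>
    intro j
    by_cases h : PySem.Chars.lowerChar x = c <;>
      simp [pvOcc, h, ih (j+1)] <;> ring_nf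

theorem pvOcc_bounds (c : Char) : ∀ (s : List Char) (j : Nat), ∀ k ∈ pvOcc c j s,
    (j : Int) ≤ k ∧ k < (j : Int) + s.length := by
  intro s
  induction s with
  | nil => intro j k hk; simp [pvOcc] at hk
  | cons x xs ih =>
    intro j k hk
    by_cases h : PySem.Chars.lowerChar x = c <;> simp [pvOcc, h] at hk
    · rcases hk with rfl | hk
      · simp only [List.length_cons]; push_cast; omega
      · have := ih (j+1) k hk; simp only [List.length_cons]; push_cast at this ⊢; omega
    · have := ih (j+1) k hk; simp only [List.length_cons]; push_cast at this ⊢; omega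

theorem pvOcc_nil_after (c : Char) : ∀ (s : List Char) (j : Nat),
    pvOcc c j s = [] → pvAfter c s = none := by
  intro s
  induction s with
  | nil => intro j _; rfl
  | cons x xs ih =>
    intro j h
    by_cases hx : PySem.Chars.lowerChar x = c <;> simp [pvOcc, pvAfter, hx] at h ⊢
    exact ih (j+1) h

theorem pvOcc_head_after (c : Char) : ∀ (s : List Char) (j : Nat) (k : Int) (rest : List Int),
    pvOcc c j s = k :: rest → ∃ m : Nat, m < s.length ∧ k = ((j + m : Nat) : Int) ∧
      pvAfter c s = some (s.drop (m + 1)) := by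
  intro s
  induction s with
  | nil => intro j k rest h; simp [pvOcc] at h
  | cons x xs ih =>
    intro j k rest h
    by_cases hx : PySem.Chars.lowerChar x = c
    · simp [pvOcc, hx] at h
      exact ⟨0, by simp, by omega, by simp [pvAfter, hx]⟩
    · simp [pvOcc, hx] at h
      obtain ⟨m, hm, hk, hA⟩ := ih (j+1) k rest h
      exact ⟨m + 1, by simpa using hm, by omega, by simp [pvAfter, hx, hA]⟩

theorem pvBisect_spec_aux (idxs : List Int) (cur : Int) (t : Nat)
    (H : ∀ k, k < idxs.length → (idxs.getD k 0 < cur ↔ k < t)) :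
    ∀ (n lo hi : Nat), hi - lo ≤ n → lo ≤ t → t ≤ hi → hi ≤ idxs.length →
      pvBisect idxs cur lo hi = t := by
  intro n
  induction n with
  | zero =>
    intro lo hi hn h1 h2 h3
    rw [pvBisect]
    have : ¬ lo < hi := by omega
    rw [dif_neg this]
    omega
  | succ n ih =>
    intro lo hi hn h1 h2 h3
    rw [pvBisect]
    by_cases hlh : lo < hi
    · rw [dif_pos hlh]
      have hmid : (lo + hi) / 2 < idxs.length := by omega
      by_cases hlt : idxs.getD ((lo + hi) / 2) 0 < cur
      · have ht := (H _ hmid).mp hlt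
        rw [if_pos hlt]
        exact ih _ _ (by omega) (by omega) h2 h3
      · have ht : ¬ (lo + hi) / 2 < t := fun hc => hlt ((H _ hmid).mpr hc)
        rw [if_neg hlt]
        exact ih _ _ (by omega) h1 (by omega) (by omega)
    · rw [dif_neg hlh]
      omega

theorem pvBisect_spec (idxs : List Int) (cur : Int) (t : Nat)
    (H : ∀ k, k < idxs.length → (idxs.getD k 0 < cur ↔ k < t)) :
    ∀ lo hi, lo ≤ t → t ≤ hi → hi ≤ idxs.length → pvBisect idxs cur lo hi = t := by
  intro lo hi
  exact pvBisect_spec_aux idxs cur t H hi lo hi (by omega)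
theorem pvALoop_nil (o : List Char) : pvALoop [] o = [] := by cases o <;> rfl

theorem pvALoop_cons (c : Char) (cs : List Char) : ∀ (s : List Char),
    pvALoop (c :: cs) (s.map PySem.Chars.lowerChar) =
      match pvAfter c s with
      | none => c :: cs
      | some s' => pvALoop cs (s'.map PySem.Chars.lowerChar) := by
  intro s
  induction s with
  | nil => simp [pvALoop, pvAfter]
  | cons x xs ih =>
    by_cases h : PySem.Chars.lowerChar x = c
    · simp [pvALoop, pvAfter, h]
    · have : (c == PySem.Chars.lowerChar x) = false := by
        simp; exact fun e => h e.symm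
      simp [pvALoop, pvAfter, h, this, ih]

theorem pvMain (full : List Char) : ∀ (inp : List Char) (j : Nat), j ≤ full.length →
    pvBLoop (pvIndex full) (j : Int) inp =
      (pvALoop ((inp.filter (fun c => c ≠ ' ')).map PySem.Chars.lowerChar)
        ((full.drop j).map PySem.Chars.lowerChar)).isEmpty := by
  intro inp
  induction inp with
  | nil => intro j hj; simp [pvBLoop, pvALoop_nil]
  | cons c cs ih =>
    intro j hj
    by_cases hsp : c = ' '
    · rw [pvBLoop]
      simp only [if_pos hsp]
      rw [ih j hj]
      simp [hsp]
    · rw [pvBLoop]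
      simp only [if_neg hsp]
      have hAside : ((c :: cs).filter (fun c => c ≠ ' ')).map PySem.Chars.lowerChar
          = PySem.Chars.lowerChar c ::
            ((cs.filter (fun c => c ≠ ' ')).map PySem.Chars.lowerChar) := by
        simp [hsp]
      rw [hAside, pvALoop_cons]
      have hidx : (pvIndex full).getD (PySem.Chars.lowerChar c) []
          = pvOcc (PySem.Chars.lowerChar c) 0 full := pvIndex_getD full _
      have hsplit : pvOcc (PySem.Chars.lowerChar c) 0 full
          = pvOcc (PySem.Chars.lowerChar c) 0 (full.take j)
            ++ pvOcc (PySem.Chars.lowerChar c) j (full.drop j) := by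
        have h := pvOcc_append (PySem.Chars.lowerChar c) (full.take j) (full.drop j) 0
        rw [List.take_append_drop] at h
        have hlen : (full.take j).length = j := by simp [List.length_take]; omega
        rw [h]; simp [hlen]
      set c' := PySem.Chars.lowerChar c with hc'
      set pre := pvOcc c' 0 (full.take j) with hpre'
      set post := pvOcc c' j (full.drop j) with hpost'
      have hlenT : (full.take j).length = j := by simp [List.length_take]; omega
      have H : ∀ k, k < (pre ++ post).length →
          ((pre ++ post).getD k 0 < (j : Int) ↔ k < pre.length) := by
        intro k hk
        by_cases h : k < pre.length
        · have hg : (pre ++ post).getD k 0 = pre[k] := by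
            rw [List.getD_eq_getElem _ _ hk, List.getElem_append_left h]
          have hmem : pre[k] ∈ pre := List.getElem_mem h
          have hb := pvOcc_bounds c' (full.take j) 0 pre[k] hmem
          rw [hlenT] at hb
          constructor
          · intro _; exact h
          · intro _; rw [hg]; push_cast at hb ⊢; omega
        · have h2 : pre.length ≤ k := by omega
          have hklen : k - pre.length < post.length := by
            simp [List.length_append] at hk; omega
          have hg : (pre ++ post).getD k 0 = post[k - pre.length] := by
            rw [List.getD_eq_getElem _ _ hk, List.getElem_append_right h2]
          have hmem : post[k - pre.length] ∈ post := List.getElem_mem hklen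
          have hb := (pvOcc_bounds c' (full.drop j) j _ hmem).1
          constructor
          · intro hlt; rw [hg] at hlt; omega
          · intro hc; omega
      have hbis : pvBisect (pre ++ post) (j : Int) 0 (pre ++ post).length = pre.length :=
        pvBisect_spec (pre ++ post) (j : Int) pre.length H 0 (pre ++ post).length
          (Nat.zero_le _) (by simp) (le_refl _)
      rw [hidx, hsplit, hbis]
      cases hpost : post with
      | nil =>
        have hafter : pvAfter c' (full.drop j) = none :=
          pvOcc_nil_after c' (full.drop j) j (by rw [← hpost'] ; exact hpost)
        rw [hafter]
        simp
      | cons k rest =>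
        obtain ⟨m, hm, hk, hafter⟩ :=
          pvOcc_head_after c' (full.drop j) j k rest (by rw [← hpost']; exact hpost)
        rw [hafter]
        have hne : ¬ pre.length = (pre ++ k :: rest).length := by simp
        rw [if_neg hne]
        have hgt : (pre ++ k :: rest).getD pre.length 0 = k := by
          rw [List.getD_eq_getElem _ _ (by simp), List.getElem_append_right (le_refl _)]
          simp
        rw [hgt]
        have hdd : (full.drop j).drop (m + 1) = full.drop (j + (m + 1)) := by
          rw [List.drop_drop]
        have hjm : j + (m + 1) ≤ full.length := by
          rw [List.length_drop] at hm; omega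
        have hih := ih (j + (m + 1)) hjm
        have hcast : k + 1 = ((j + (m + 1) : Nat) : Int) := by rw [hk]; push_cast; ring
        rw [hcast, hih, hdd]

-- ===== VERDICT (by name: the statement is the Claim_ definition above) =====
theorem is_in_order_match_spec : Claim_equal_is_in_order_match := by
  intro input_str other _
  unfold Spec_is_in_order_match is_in_order_match is_in_order_match_alt
  have h := pvMain other.toList input_str.toList 0 (Nat.zero_le _)
  simpa using h.symm
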